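-- pv_equiv track=rewrite | github.com/Brendan-James/AdventofCode2024 | 24.py | calculate
-- ===== SOURCE A (Python) =====
-- def process(num,letter):
--     out = str(num)
--     while len(out)<2:
--         out = "0"+out
--     return letter+out
--
-- def calculate(facts,letter):
--     index = 0
--     total = 0
--     while process(index,letter) in facts:
--         if facts[process(index,letter)]:
--             total+=2**index
--         index+=1
--     return total
-- ===== SOURCE B (Python) =====
-- def calculate(facts, letter):
--     bits = []
--     index = 0
--     while f"{letter}{index:02d}" in facts:
--         bits.append(1 if facts[f"{letter}{index:02d}"] else 0)
--         index += 1
--     value = 0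
--     for bit in reversed(bits):
--         value = 2 * value + bit
--     return value
-- ===== Notes on version B (the rewrite author's own statement) =====
-- stated objective: alternative
-- what changed: B separates extraction from evaluation: it collects the consecutive bits into a list (keys built by f-string zero-padding instead of the process() pad loop) and then evaluates the list by Horner's rule (value = 2*value + bit) over the reversed list, instead of A's single loop that adds 2**index as it scans.
import Mathlib
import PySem

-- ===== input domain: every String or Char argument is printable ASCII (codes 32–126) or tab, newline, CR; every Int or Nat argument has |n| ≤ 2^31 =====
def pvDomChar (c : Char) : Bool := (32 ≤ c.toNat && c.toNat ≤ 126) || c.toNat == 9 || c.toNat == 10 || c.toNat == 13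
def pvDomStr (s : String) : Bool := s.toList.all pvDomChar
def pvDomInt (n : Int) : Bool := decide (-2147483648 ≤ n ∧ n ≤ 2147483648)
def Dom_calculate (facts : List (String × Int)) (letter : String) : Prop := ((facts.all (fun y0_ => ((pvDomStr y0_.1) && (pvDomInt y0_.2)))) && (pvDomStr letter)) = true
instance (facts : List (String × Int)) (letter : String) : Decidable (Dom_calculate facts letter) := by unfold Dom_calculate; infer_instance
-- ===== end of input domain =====

-- B changes the decomposition: it collects the run of bits into a list and evaluates it by
-- Horner's rule instead of summing 2**index inside the scan; same cost, no speed claim.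

-- Shared dict primitive: `key in facts` / `facts[key]` on the assoc list, first match
-- (keys compared through their character lists; exact for Python str equality).
def pyDictGet? (facts : List (String × Int)) (k : List Char) : Option Int :=
  (facts.find? (fun p => p.1.toList == k)).map (·.2)

-- ===== PORT A =====
-- the while-loop of process(): prepend '0' while len(out) < 2
def padA (out : List Char) : List Char :=
  if h : out.length < 2 then padA ('0' :: out) else out
  termination_by 2 - out.length
  decreasing_by simp; omega

def processA (num : Int) (letter : String) : List Char :=
  letter.toList ++ padA (PySem.Int.toChars num)

-- A's while loop; fuel facts.length + 1 suffices: distinct indices give distinct keys,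
-- so at most facts.length iterations find their key in facts.
def loopA (facts : List (String × Int)) (letter : String) : Nat → Int → Int → Int
  | 0, _, total => total
  | fuel + 1, index, total =>
    match pyDictGet? facts (processA index letter) with
    | none => total
    | some v => loopA facts letter fuel (index + 1)
        (if v ≠ 0 then total + 2 ^ index.toNat else total)

def calculate (facts : List (String × Int)) (letter : String) : Int :=
  loopA facts letter (facts.length + 1) 0 0

-- ===== PORT B =====
-- f"{letter}{index:02d}" : zero-pad the decimal digits to width 2 in one step
def keyB (letter : String) (i : Int) : List Char :=
  let s := PySem.Int.toChars i
  letter.toList ++ (List.replicate (2 - s.length) '0' ++ s)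

-- the extraction while-loop: collect the consecutive bits into a list (same fuel bound)
def bitsB (facts : List (String × Int)) (letter : String) : Nat → Int → List Int
  | 0, _ => []
  | fuel + 1, index =>
    match pyDictGet? facts (keyB letter index) with
    | none => []
    | some v => (if v ≠ 0 then (1 : Int) else 0) :: bitsB facts letter fuel (index + 1)

def calculate_alt (facts : List (String × Int)) (letter : String) : Int :=
  ((bitsB facts letter (facts.length + 1) 0).reverse).foldl (fun value bit => 2 * value + bit) 0

-- ===== PRECONDITION & SPEC =====
def Spec_calculate (facts : List (String × Int)) (letter : String) (out : Int) : Prop := out = calculate_alt facts letter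
instance (facts : List (String × Int)) (letter : String) (out : Int) : Decidable (Spec_calculate facts letter out) := by unfold Spec_calculate; infer_instance

-- ===== CLAIM (what is proved, stated in full; the proofs are below) =====
def Claim_equal_calculate : Prop := ∀ (facts : List (String × Int)) (letter : String), Dom_calculate facts letter → Spec_calculate facts letter (calculate facts letter)

-- ===== LEMMAS AND PROOFS =====

-- the two key constructions agree: the pad loop equals one-step left padding
theorem padA_eq_replicate (s : List Char) :
    padA s = List.replicate (2 - s.length) '0' ++ s := by
  match s with
  | [] => rw [padA]; rw [padA]; rw [padA]; simp
  | [a] => rw [padA]; rw [padA]; simp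
  | a :: b :: t => rw [padA]; simp

theorem processA_eq_keyB (letter : String) (i : Int) :
    processA i letter = keyB letter i := by
  simp [processA, keyB, padA_eq_replicate]

-- Horner value of an LSB-first bit list
def hornerVal (bs : List Int) : Int := bs.foldr (fun bit acc => 2 * acc + bit) 0

-- loop invariant: A's running sum equals total + 2^index * (Horner value of B's bit list)
theorem loopA_eq_horner (facts : List (String × Int)) (letter : String) :
    ∀ (fuel : Nat) (i t : Int), 0 ≤ i →
      loopA facts letter fuel i t = t + 2 ^ i.toNat * hornerVal (bitsB facts letter fuel i) := by
  intro fuel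
  induction fuel with
  | zero => intro i t _; simp [loopA, bitsB, hornerVal]
  | succ fuel ih =>
    intro i t hi
    rw [loopA, bitsB, processA_eq_keyB]
    cases h : pyDictGet? facts (keyB letter i) with
    | none => simp [hornerVal]
    | some v =>
      dsimp only
      have hto : (i + 1).toNat = i.toNat + 1 := by omega
      rw [ih (i + 1) _ (by omega)]
      simp only [hornerVal, List.foldr_cons, hto]
      by_cases hv : v ≠ 0 <;> simp [hv] <;> ring

-- ===== VERDICT (by name: the statement is the Claim_ definition above) =====

theorem calculate_spec : Claim_equal_calculate := by
  intro facts letter _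
  unfold Spec_calculate calculate calculate_alt
  rw [List.foldl_reverse, loopA_eq_horner facts letter _ 0 0 le_rfl]
  simp [hornerVal]
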